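-- pv_equiv track=rewrite | github.com/dantetemplar/competitive-programming | Codeforces - Codeforces Round 1051 (Div. 2)/B_Скидки.py | solve
-- ===== SOURCE A (Python) =====
-- def solve(n: int, k: int, A: list[int], B: list[int]) -> int:
--     S = 0
--
--     A.sort(reverse=False)
--     B.sort(reverse=True)
--
--     while B and A:
--         b = B.pop()
--         a = 0
--         for _ in range(b):
--             if not A:
--                 break
--             a = A.pop()
--             S += a
--         else:
--             S -= a
--
--     while A:
--         S += A.pop()
--
--     return S
-- ===== SOURCE B (Python) =====
-- def solve(n: int, k: int, A: list[int], B: list[int]) -> int: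
--     # Note: unlike the original, this does not mutate A or B; return value only.
--     As = sorted(A)
--     total = sum(As)
--     p = len(As)
--     for b in sorted(B):
--         if b <= 0:
--             continue
--         if p >= b:
--             total -= As[p - b]
--             p -= b
--         else:
--             break
--     return total
-- ===== Notes on version B (the rewrite author's own statement) =====
-- stated objective: simpler
-- what changed: Replaces A's destructive nested pop-and-accumulate loops (pop each group element-by-element off the end of A, summing, then subtracting the last popped element) by a single pointer sweep: total = sum(A), then for each positive b in ascending sorted(B) subtract the group minimum As[p-b] and move the pointer down b at once, breaking when fewer than b items remain.
import Mathlib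
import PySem

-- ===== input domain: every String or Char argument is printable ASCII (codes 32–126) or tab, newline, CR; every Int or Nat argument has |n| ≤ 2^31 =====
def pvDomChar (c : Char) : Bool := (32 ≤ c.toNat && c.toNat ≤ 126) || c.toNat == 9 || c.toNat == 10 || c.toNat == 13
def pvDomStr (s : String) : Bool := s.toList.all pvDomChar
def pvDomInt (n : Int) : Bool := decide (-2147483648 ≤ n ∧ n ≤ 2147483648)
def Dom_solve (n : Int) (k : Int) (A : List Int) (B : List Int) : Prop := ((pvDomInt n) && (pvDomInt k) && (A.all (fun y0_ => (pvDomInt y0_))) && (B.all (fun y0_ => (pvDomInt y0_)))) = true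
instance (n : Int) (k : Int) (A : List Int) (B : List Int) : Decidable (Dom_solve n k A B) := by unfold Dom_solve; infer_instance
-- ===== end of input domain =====

-- B replaces A's nested pop-and-accumulate loops by "total = sum(A) minus the minimum of each
-- discounted top group", a single pointer sweep over sorted(B) (objective: simpler).
-- A mutates its list arguments in place (empties A, shrinks B); B does not — the equivalence is
-- about the return value only.

-- ===== PORT A =====
-- inner 'for _ in range(b)' loop: pops from the end of A, accumulating into S;
-- returns (A, S, a, broke) where broke records whether 'break' fired (for the for-else).
def solveInner : Nat → List Int → Int → Int → List Int × Int × Int × Bool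
  | 0, A, S, a => (A, S, a, false)
  | m+1, A, S, a =>
    match A.getLast? with
    | none => (A, S, a, true)
    | some x => solveInner m A.dropLast (S + x) x

-- outer 'while B and A' loop
def solveOuter (A B : List Int) (S : Int) : List Int × Int :=
  match hB : B.getLast? with
  | none => (A, S)
  | some b =>
    if A = [] then (A, S)
    else
      let r := solveInner b.toNat A S 0
      solveOuter r.1 B.dropLast (if r.2.2.2 then r.2.1 else r.2.1 - r.2.2.1)
termination_by B.length
decreasing_by
  have hne : B ≠ [] := by intro h; subst h; simp at hB
  have := List.length_pos_iff.mpr hne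
  simp [List.length_dropLast]; omega

-- final 'while A: S += A.pop()'
def solveDrain (A : List Int) (S : Int) : Int :=
  if h : A = [] then S else solveDrain A.dropLast (S + A.getLast h)
termination_by A.length
decreasing_by
  have := List.length_pos_iff.mpr h
  simp [List.length_dropLast]; omega

def solve (n : Int) (k : Int) (A : List Int) (B : List Int) : Int :=
  let As := PySem.List.sorted A (fun x => x) false
  let Bs := PySem.List.sorted B (fun x => x) true
  let r := solveOuter As Bs 0
  solveDrain r.1 r.2

-- ===== PORT B =====
-- for b in sorted(B): skip b<=0; if p>=b subtract As[p-b] and p-=b; else break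
def altLoop : List Int → Nat → List Int → Int → Int
  | [], _, _, total => total
  | b :: bs, p, As, total =>
    if b ≤ 0 then altLoop bs p As total
    else if b ≤ (p : Int) then
      altLoop bs (p - b.toNat) As (total - As.getD (p - b.toNat) 0)
    else total

def solve_alt (n : Int) (k : Int) (A : List Int) (B : List Int) : Int :=
  let As := PySem.List.sorted A (fun x => x) false
  altLoop (PySem.List.sorted B (fun x => x) false) As.length As As.sum

-- ===== PRECONDITION & SPEC =====
def Spec_solve (n : Int) (k : Int) (A : List Int) (B : List Int) (out : Int) : Prop := out = solve_alt n k A B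
instance (n : Int) (k : Int) (A : List Int) (B : List Int) (out : Int) : Decidable (Spec_solve n k A B out) := by unfold Spec_solve; infer_instance

-- ===== CLAIM (what is proved, stated in full; the proofs are below) =====
def Claim_equal_solve : Prop := ∀ (n : Int) (k : Int) (A : List Int) (B : List Int), Dom_solve n k A B → Spec_solve n k A B (solve n k A B)

-- ===== LEMMAS AND PROOFS =====

-- reversing the descending int sort gives the ascending int sort
theorem desc_reverse (B : List Int) :
    (PySem.List.sorted B (fun x => x) true).reverse = PySem.List.sorted B (fun x => x) false := by
  refine (PySem.List.sorted_id_eq_of_perm_of_pairwise B _ ?_ ?_).symm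
  · exact (List.reverse_perm _).trans (PySem.List.sorted_perm _ _ _)
  · exact List.pairwise_reverse.mpr (PySem.List.sorted_pairwise_rev B (fun x => x))

theorem drain_eq (A : List Int) (S : Int) : solveDrain A S = S + A.sum := by
  induction A using List.reverseRecOn generalizing S with
  | nil => rw [solveDrain]; simp
  | append_singleton xs x ih =>
    rw [solveDrain]
    simp only [List.dropLast_concat, List.getLast_concat]
    rw [dif_neg (by simp), ih]
    simp; ring

theorem inner_step (m : Nat) (l : List Int) (x : Int) (S a : Int) :
    solveInner (m+1) (l ++ [x]) S a = solveInner m l (S + x) x := by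
  simp [solveInner]

theorem inner_nil (m : Nat) (S a : Int) :
    solveInner (m+1) [] S a = ([], S, a, true) := by
  simp [solveInner]

theorem take_split (As : List Int) (p : Nat) (hp0 : 0 < p) (hp : As.length ≥ p) :
    As.take p = As.take (p-1) ++ [As.getD (p-1) 0] := by
  have hj : p - 1 < As.length := by omega
  conv_lhs => rw [show p = (p-1)+1 by omega]
  rw [List.take_succ]
  simp [List.getElem?_eq_getElem hj, List.getD]

theorem inner_le (As : List Int) (m : Nat) : ∀ (p : Nat) (S a : Int), p ≤ As.length → m ≤ p →
    solveInner m (As.take p) S a =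
      (As.take (p - m), S + (As.take p).sum - (As.take (p - m)).sum,
       if m = 0 then a else As.getD (p - m) 0, false) := by
  induction m with
  | zero =>
    intro p S a hp hm
    simp [solveInner]
  | succ m ih =>
    intro p S a hp hm
    have hp0 : 0 < p := by omega
    have hsplit := take_split As p hp0 hp
    have hsum : (As.take p).sum = (As.take (p-1)).sum + As.getD (p-1) 0 := by
      rw [hsplit, List.sum_append]; simp
    conv_lhs => rw [hsplit]
    rw [inner_step, ih (p-1) _ _ (by omega) (by omega)]
    simp only [Prod.mk.injEq]
    refine ⟨?_, ?_, ?_, trivial⟩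
    · congr 1; omega
    · rw [hsum, show p - 1 - m = p - (m+1) by omega]; ring
    · rw [if_neg (Nat.succ_ne_zero m)]
      split_ifs with h
      · subst h; congr 1
      · congr 1; omega

theorem inner_gt (As : List Int) (m : Nat) : ∀ (p : Nat) (S a : Int), p ≤ As.length → p < m → 0 < p →
    solveInner m (As.take p) S a = ([], S + (As.take p).sum, As.getD 0 0, true) := by
  induction m with
  | zero => intro p S a _ hm _; omega
  | succ m ih =>
    intro p S a hp hm hp0
    have hsplit := take_split As p hp0 hp
    have hsum : (As.take p).sum = (As.take (p-1)).sum + As.getD (p-1) 0 := by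
      rw [hsplit, List.sum_append]; simp
    conv_lhs => rw [hsplit]
    rw [inner_step]
    by_cases h1 : p = 1
    · subst h1
      cases m with
      | zero => omega
      | succ m' =>
        simp only [Nat.sub_self, List.take_zero] at *
        rw [inner_nil]
        simp only [Prod.mk.injEq, true_and, and_true]
        rw [hsum]; simp
    · rw [ih (p-1) _ _ (by omega) (by omega) (by omega)]
      simp only [Prod.mk.injEq, true_and, and_true]
      rw [hsum]; ring

theorem outer_nil (B : List Int) (S : Int) : solveOuter [] B S = ([], S) := by
  rw [solveOuter]
  split <;> simp

theorem altLoop_zero (bs : List Int) (As : List Int) (total : Int) :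
    altLoop bs 0 As total = total := by
  induction bs with
  | nil => rfl
  | cons b t ih =>
    unfold altLoop
    split
    · exact ih
    · rw [if_neg (by omega)]

theorem outer_step (A : List Int) (t : List Int) (b : Int) (S : Int) (hA : A ≠ []) :
    solveOuter A (t ++ [b]) S =
      solveOuter (solveInner b.toNat A S 0).1 t
        (if (solveInner b.toNat A S 0).2.2.2 then (solveInner b.toNat A S 0).2.1
         else (solveInner b.toNat A S 0).2.1 - (solveInner b.toNat A S 0).2.2.1) := by
  rw [solveOuter]
  split
  · rename_i hB; simp at hB
  · rename_i b1 hB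
    simp only [List.getLast?_concat, Option.some.injEq] at hB
    subst hB
    simp [hA]

theorem outer_empty (A : List Int) (S : Int) : solveOuter A [] S = (A, S) := by
  rw [solveOuter]
  split
  · rfl
  · rename_i b hB; simp at hB

theorem main_loop (As : List Int) (bs : List Int) : ∀ (p : Nat) (S : Int), p ≤ As.length →
    solveDrain (solveOuter (As.take p) bs.reverse S).1 (solveOuter (As.take p) bs.reverse S).2
      = altLoop bs p As (S + (As.take p).sum) := by
  induction bs with
  | nil =>
    intro p S hp
    rw [List.reverse_nil, outer_empty]
    simp [drain_eq, altLoop]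
  | cons b t ih =>
    intro p S hp
    by_cases hp0 : p = 0
    · subst hp0
      simp only [List.take_zero]
      rw [outer_nil, altLoop_zero]
      simp [drain_eq]
    · have hne : As.take p ≠ [] := by
        have hlen : (As.take p).length = p := by simp; omega
        intro h; rw [h] at hlen; simp at hlen; omega
      rw [List.reverse_cons, outer_step _ _ _ _ hne]
      by_cases hb : b ≤ 0
      · have hb0 : b.toNat = 0 := Int.toNat_of_nonpos hb
        rw [hb0]
        simp only [solveInner, Bool.false_eq_true, if_false, sub_zero]
        rw [ih p S hp]
        conv_rhs => rw [altLoop]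
        rw [if_pos hb]
      · by_cases hbp : b ≤ (p : Int)
        · have hm1 : 1 ≤ b.toNat := by omega
          have hmp : b.toNat ≤ p := by omega
          rw [inner_le As b.toNat p S 0 hp hmp]
          simp only [if_neg (by omega : ¬ b.toNat = 0), Bool.false_eq_true, if_false]
          rw [ih (p - b.toNat) _ (by omega)]
          conv_rhs => rw [altLoop]
          rw [if_neg hb, if_pos hbp]
          congr 1
          ring
        · have hmp : p < b.toNat := by omega
          rw [inner_gt As b.toNat p S 0 hp hmp (by omega)]
          rw [if_pos rfl]
          rw [outer_nil]
          conv_rhs => rw [altLoop]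
          rw [if_neg hb, if_neg hbp]
          rw [drain_eq]
          simp

-- ===== VERDICT (by name: the statement is the Claim_ definition above) =====
theorem solve_spec : Claim_equal_solve := by
  intro n k A B _
  unfold Spec_solve solve solve_alt
  have hdesc : PySem.List.sorted B (fun x => x) true
      = (PySem.List.sorted B (fun x => x) false).reverse := by
    rw [← desc_reverse B, List.reverse_reverse]
  have h := main_loop (PySem.List.sorted A (fun x => x) false)
    (PySem.List.sorted B (fun x => x) false)
    (PySem.List.sorted A (fun x => x) false).length 0 le_rfl
  simp only [List.take_length, zero_add] at h
  simp only [hdesc]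
  exact h
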